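-- pv_equiv track=rewrite | github.com/TrellixVulnTeam/study_B8IU | programmers-workspace/LEVEL2/예상 대진표.py | solution
-- ===== SOURCE A (Python) =====
-- def solution(n, a, b):
--     n, a, b = n - 1, a - 1, b - 1
--     rnd = 0
--
--     while True:
--         rnd += 1
--         if a % 2 == 0 and a + 1 == b or b % 2 == 0 and b + 1 == a:
--             break
--         a, b = a // 2, b // 2
--     return rnd
-- ===== SOURCE B (Python) =====
-- def solution(n, a, b):
--     return ((a - 1) ^ (b - 1)).bit_length()
-- ===== Notes on version B (the rewrite author's own statement) =====
-- stated objective: simpler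
-- what changed: Replaces A's halve-until-siblings while-loop with the closed form ((a-1)^(b-1)).bit_length(): the round two bracket slots first meet is the highest differing bit of their 0-indexed positions; n is unused by A and ignored.
import Mathlib
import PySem

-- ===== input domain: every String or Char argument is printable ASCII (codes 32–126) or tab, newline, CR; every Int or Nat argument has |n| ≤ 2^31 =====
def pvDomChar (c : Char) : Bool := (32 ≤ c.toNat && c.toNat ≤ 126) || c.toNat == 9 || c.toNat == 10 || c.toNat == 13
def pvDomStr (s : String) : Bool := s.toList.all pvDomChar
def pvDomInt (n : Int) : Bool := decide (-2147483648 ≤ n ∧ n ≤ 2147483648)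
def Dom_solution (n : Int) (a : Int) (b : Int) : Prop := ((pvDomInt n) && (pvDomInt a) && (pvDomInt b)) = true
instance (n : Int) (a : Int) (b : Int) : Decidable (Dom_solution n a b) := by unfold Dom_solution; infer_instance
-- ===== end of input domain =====

-- B replaces A's halve-until-siblings loop by the closed form bit_length((a-1) xor (b-1)); n is unused by A.
-- Pre_solution excludes exactly the inputs on which A never returns (infinite loop): a = b, and
-- position pairs on opposite sides of 1 (the loop then reaches the fixed point (-1, 0) with no break).


-- ===== PORT A =====
-- the while-loop of A; the Nat fuel only makes the recursion total (unreachable under Pre_solution,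
-- where the loop provably breaks before the fuel runs out)
def solLoopA (fuel : Nat) (a b rnd : Int) : Int :=
  match fuel with
  | 0 => rnd
  | f + 1 =>
    let rnd := rnd + 1
    if (PySem.Int.mod a 2 = 0 ∧ a + 1 = b) ∨ (PySem.Int.mod b 2 = 0 ∧ b + 1 = a) then rnd
    else solLoopA f (PySem.Int.floordiv a 2) (PySem.Int.floordiv b 2) rnd

def solution (n : Int) (a : Int) (b : Int) : Int :=
  solLoopA ((a - 1).natAbs + (b - 1).natAbs + 1) (a - 1) (b - 1) 0

-- ===== PORT B =====
def solution_alt (n : Int) (a : Int) (b : Int) : Int :=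
  (PySem.Int.bitLength (PySem.Int.bxor (a - 1) (b - 1)) : Int)

-- ===== PRECONDITION & SPEC =====
-- exactly the inputs on which A returns: elsewhere (a = b, or a,b on opposite sides of 1) A loops forever
def Pre_solution (n : Int) (a : Int) (b : Int) : Prop :=
  a ≠ b ∧ ((1 ≤ a ∧ 1 ≤ b) ∨ (a ≤ 0 ∧ b ≤ 0))
instance (n : Int) (a : Int) (b : Int) : Decidable (Pre_solution n a b) := by
  unfold Pre_solution; infer_instance
def pvWitness_solution : Int × Int × Int := (8, 4, 7)

def Spec_solution (n : Int) (a : Int) (b : Int) (out : Int) : Prop := out = solution_alt n a b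
instance (n : Int) (a : Int) (b : Int) (out : Int) : Decidable (Spec_solution n a b out) := by
  unfold Spec_solution; infer_instance

-- ===== CLAIM (what is proved, stated in full; the proofs are below) =====
def Claim_equal_solution : Prop := ∀ (n : Int) (a : Int) (b : Int),
  Dom_solution n a b → Pre_solution n a b → Spec_solution n a b (solution n a b)

-- ===== LEMMAS AND PROOFS =====

theorem xor_div_two (p q : Nat) : (p ^^^ q) / 2 = (p / 2) ^^^ (q / 2) := by
  apply Nat.eq_of_testBit_eq; intro i
  simp [Nat.testBit_div_two, Nat.testBit_xor]

theorem xor_mod_two (p q : Nat) : (p ^^^ q) % 2 = (p % 2 + q % 2) % 2 := by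
  have h := congrArg (fun m => Nat.testBit m 0) (rfl : p ^^^ q = p ^^^ q)
  have h0 : Nat.testBit (p ^^^ q) 0 = (Nat.testBit p 0 ^^ Nat.testBit q 0) := Nat.testBit_xor p q 0
  simp only [Nat.testBit_zero] at h0
  rcases Nat.mod_two_eq_zero_or_one p with hp | hp <;>
    rcases Nat.mod_two_eq_zero_or_one q with hq | hq <;>
    simp [hp, hq] at h0 ⊢ <;> omega

theorem xor_eq_one_iff (p q : Nat) :
    p ^^^ q = 1 ↔ (p % 2 = 0 ∧ q = p + 1) ∨ (q % 2 = 0 ∧ p = q + 1) := by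
  constructor
  · intro h
    have hd : (p / 2) ^^^ (q / 2) = 0 := by rw [← xor_div_two, h]
    have hd' : p / 2 = q / 2 := Nat.xor_eq_zero_iff.mp hd
    have hm : (p % 2 + q % 2) % 2 = 1 := by rw [← xor_mod_two, h]
    omega
  · intro h
    have hd' : p / 2 = q / 2 := by omega
    have hd : (p ^^^ q) / 2 = 0 := by rw [xor_div_two, hd', Nat.xor_self]
    have hm : (p ^^^ q) % 2 = 1 := by rw [xor_mod_two]; omega
    omega

-- one loop step on nonnegative (cast) arguments, phrased over Nat
theorem loopA_nonneg : ∀ (f : Nat) (p q : Nat) (r : Int), p ≠ q → p + q + 1 ≤ f →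
    solLoopA f (p : Int) (q : Int) r = r + (PySem.Int.bitLength ((p ^^^ q : Nat) : Int) : Int) := by
  intro f
  induction f with
  | zero => intro p q r hne hf; omega
  | succ f ih =>
    intro p q r hne hf
    have hmodp : PySem.Int.mod (p : Int) 2 = (p : Int) % 2 := PySem.Int.mod_eq_emod_of_pos (by norm_num)
    have hmodq : PySem.Int.mod (q : Int) 2 = (q : Int) % 2 := PySem.Int.mod_eq_emod_of_pos (by norm_num)
    have hdivp : PySem.Int.floordiv (p : Int) 2 = ((p / 2 : Nat) : Int) := by
      rw [PySem.Int.floordiv_eq_ediv_of_pos (by norm_num)]; omega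
    have hdivq : PySem.Int.floordiv (q : Int) 2 = ((q / 2 : Nat) : Int) := by
      rw [PySem.Int.floordiv_eq_ediv_of_pos (by norm_num)]; omega
    by_cases hc : (p % 2 = 0 ∧ q = p + 1) ∨ (q % 2 = 0 ∧ p = q + 1)
    · have hone : p ^^^ q = 1 := (xor_eq_one_iff p q).mpr hc
      have hcond : (PySem.Int.mod (p : Int) 2 = 0 ∧ (p : Int) + 1 = (q : Int)) ∨
          (PySem.Int.mod (q : Int) 2 = 0 ∧ (q : Int) + 1 = (p : Int)) := by
        rw [hmodp, hmodq]; omega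
      simp only [solLoopA, if_pos hcond, hone]
      norm_num
      decide
    · have hcond : ¬ ((PySem.Int.mod (p : Int) 2 = 0 ∧ (p : Int) + 1 = (q : Int)) ∨
          (PySem.Int.mod (q : Int) 2 = 0 ∧ (q : Int) + 1 = (p : Int))) := by
        rw [hmodp, hmodq]; omega
      have hxne : p ^^^ q ≠ 0 := fun h => hne (Nat.xor_eq_zero_iff.mp h)
      have hxne1 : p ^^^ q ≠ 1 := fun h => hc ((xor_eq_one_iff p q).mp h)
      have hdne : p / 2 ≠ q / 2 := by
        intro h
        have := xor_mod_two p q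
        have : p ^^^ q = 1 := by
          have hd : (p ^^^ q) / 2 = 0 := by rw [xor_div_two, h, Nat.xor_self]
          omega
        exact hxne1 this
      have hfuel : p / 2 + q / 2 + 1 ≤ f := by omega
      simp only [solLoopA, if_neg hcond, hdivp, hdivq]
      rw [ih (p / 2) (q / 2) (r + 1) hdne hfuel]
      rw [← xor_div_two]
      have hbl : PySem.Int.bitLength ((p ^^^ q : Nat) : Int) =
          PySem.Int.bitLength (((p ^^^ q) / 2 : Nat) : Int) + 1 :=
        PySem.Int.bitLength_natCast (by omega)
      rw [hbl]; push_cast; ring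

-- A's loop on two negative arguments mirrors the loop on the complements (~x = -1-x ≥ 0)
theorem loopA_refl : ∀ (f : Nat) (p q : Nat) (r : Int),
    solLoopA f (Int.negSucc p) (Int.negSucc q) r = solLoopA f (p : Int) (q : Int) r := by
  intro f
  induction f with
  | zero => intro p q r; rfl
  | succ f ih =>
    intro p q r
    have hnp : (Int.negSucc p) = -(p : Int) - 1 := by omega
    have hnq : (Int.negSucc q) = -(q : Int) - 1 := by omega
    have hmodp : PySem.Int.mod (Int.negSucc p) 2 = (Int.negSucc p) % 2 := PySem.Int.mod_eq_emod_of_pos (by norm_num)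
    have hmodq : PySem.Int.mod (Int.negSucc q) 2 = (Int.negSucc q) % 2 := PySem.Int.mod_eq_emod_of_pos (by norm_num)
    have hmodp' : PySem.Int.mod (p : Int) 2 = (p : Int) % 2 := PySem.Int.mod_eq_emod_of_pos (by norm_num)
    have hmodq' : PySem.Int.mod (q : Int) 2 = (q : Int) % 2 := PySem.Int.mod_eq_emod_of_pos (by norm_num)
    have hdivp : PySem.Int.floordiv (Int.negSucc p) 2 = Int.negSucc (p / 2) := by
      rw [PySem.Int.floordiv_eq_ediv_of_pos (by norm_num)]; omega
    have hdivq : PySem.Int.floordiv (Int.negSucc q) 2 = Int.negSucc (q / 2) := by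
      rw [PySem.Int.floordiv_eq_ediv_of_pos (by norm_num)]; omega
    have hdivp' : PySem.Int.floordiv (p : Int) 2 = ((p / 2 : Nat) : Int) := by
      rw [PySem.Int.floordiv_eq_ediv_of_pos (by norm_num)]; omega
    have hdivq' : PySem.Int.floordiv (q : Int) 2 = ((q / 2 : Nat) : Int) := by
      rw [PySem.Int.floordiv_eq_ediv_of_pos (by norm_num)]; omega
    have hcond : ((PySem.Int.mod (Int.negSucc p) 2 = 0 ∧ (Int.negSucc p) + 1 = (Int.negSucc q)) ∨
        (PySem.Int.mod (Int.negSucc q) 2 = 0 ∧ (Int.negSucc q) + 1 = (Int.negSucc p))) ↔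
        ((PySem.Int.mod (p : Int) 2 = 0 ∧ (p : Int) + 1 = (q : Int)) ∨
        (PySem.Int.mod (q : Int) 2 = 0 ∧ (q : Int) + 1 = (p : Int))) := by
      rw [hmodp, hmodq, hmodp', hmodq', hnp, hnq]; omega
    by_cases hc : (PySem.Int.mod (p : Int) 2 = 0 ∧ (p : Int) + 1 = (q : Int)) ∨
        (PySem.Int.mod (q : Int) 2 = 0 ∧ (q : Int) + 1 = (p : Int))
    · simp only [solLoopA, if_pos hc, if_pos (hcond.mpr hc)]
    · simp only [solLoopA, if_neg hc, if_neg (fun h => hc (hcond.mp h)), hdivp, hdivq, hdivp', hdivq']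
      exact ih (p / 2) (q / 2) (r + 1)

theorem bxor_negSucc (p q : Nat) : PySem.Int.bxor (Int.negSucc p) (Int.negSucc q) = ((p ^^^ q : Nat) : Int) := by
  simp [PySem.Int.bxor]

theorem exists_negSucc_of_neg (x : Int) (h : x < 0) : ∃ p : Nat, x = Int.negSucc p := by
  match x with
  | Int.ofNat m => exact absurd h (by simp)
  | Int.negSucc p => exact ⟨p, rfl⟩

-- ===== VERDICT (by name: the statement is the Claim_ definition above) =====
theorem solution_spec : Claim_equal_solution := by
  intro n a b _ hpre
  obtain ⟨hne, hside⟩ := hpre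
  unfold Spec_solution solution solution_alt
  rcases hside with ⟨ha, hb⟩ | ⟨ha, hb⟩
  · -- both positions nonnegative after 0-indexing
    set p := (a - 1).toNat with hp
    set q := (b - 1).toNat with hq
    have hap : a - 1 = (p : Int) := by omega
    have hbq : b - 1 = (q : Int) := by omega
    have hpq : p ≠ q := by omega
    rw [hap, hbq, PySem.Int.bxor_natCast]
    have hfuel : p + q + 1 ≤ (p : Int).natAbs + (q : Int).natAbs + 1 := by omega
    rw [loopA_nonneg _ p q 0 hpq hfuel]
    simp
  · -- both positions negative after 0-indexing: mirror to the complements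
    obtain ⟨p, hpa⟩ := exists_negSucc_of_neg (a - 1) (by omega)
    obtain ⟨q, hqb⟩ := exists_negSucc_of_neg (b - 1) (by omega)
    have hpq : p ≠ q := by
      intro h; apply hne; omega
    rw [hpa, hqb, bxor_negSucc, loopA_refl]
    have hfuel : p + q + 1 ≤ (Int.negSucc p).natAbs + (Int.negSucc q).natAbs + 1 := by omega
    rw [loopA_nonneg _ p q 0 hpq hfuel]
    simp
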